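-- pv_equiv track=rewrite | github.com/MolfarUA/CodeWars_Solutions | 6 kyu/Survivors Ep.4/solution.py | survivors
-- ===== SOURCE A (Python) =====
-- def survivors(list_of_momentum, list_of_powerups):
--     output = []
--     i = 0
--     for momentum, powerups in zip(list_of_momentum, list_of_powerups):
--         if momentum <= 0:
--             i = i + 1
--             continue
--         isSuccess = True
--         for element in powerups:
--             momentum = momentum + (element - 1)
--             if momentum <= 0:
--                 isSuccess = False
--                 break
--         if isSuccess or momentum > 0:
--             output.append(i)
--
--         i = i + 1
--
--     return output
-- ===== SOURCE B (Python) =====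
-- def survivors(list_of_momentum, list_of_powerups):
--     # An index survives iff its momentum exceeds the worst prefix drain of its
--     # powerup list: threshold(ps) = max over prefixes k of (k - sum(ps[:k])).
--     def threshold(powerups):
--         drain = 0
--         worst = 0
--         for e in powerups:
--             drain += 1 - e
--             if drain > worst:
--                 worst = drain
--         return worst
--     return [i for i, (momentum, powerups) in enumerate(zip(list_of_momentum, list_of_powerups))
--             if momentum > threshold(powerups)]
-- ===== Notes on version B (the rewrite author's own statement) =====
-- stated objective: alternative
-- what changed: Instead of simulating the running momentum step by step with an early break, B precomputes for each powerup list a single threshold (its maximum prefix drain, max_k of k minus the sum of the first k powerups) and keeps index i iff momentum > threshold, so survival becomes one comparison per pair with no per-step positivity test.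
import Mathlib
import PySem

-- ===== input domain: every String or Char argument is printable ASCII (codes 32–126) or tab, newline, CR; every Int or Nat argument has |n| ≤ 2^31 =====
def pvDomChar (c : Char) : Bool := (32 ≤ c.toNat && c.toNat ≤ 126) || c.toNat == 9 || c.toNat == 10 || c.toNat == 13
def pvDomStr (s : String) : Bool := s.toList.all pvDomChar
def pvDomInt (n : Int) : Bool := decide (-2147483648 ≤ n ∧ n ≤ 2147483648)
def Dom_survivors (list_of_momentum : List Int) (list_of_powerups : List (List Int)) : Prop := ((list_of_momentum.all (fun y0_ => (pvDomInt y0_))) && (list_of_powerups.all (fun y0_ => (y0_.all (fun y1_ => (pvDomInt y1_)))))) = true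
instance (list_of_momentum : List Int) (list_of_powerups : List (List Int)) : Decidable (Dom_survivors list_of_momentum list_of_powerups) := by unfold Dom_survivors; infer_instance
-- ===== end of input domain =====

-- B replaces A's step-by-step momentum simulation with an early break by a per-list
-- threshold (maximum prefix drain) and a single comparison momentum > threshold (alternative; same cost).


-- ===== PORT A =====
-- inner loop of A: walks powerups updating momentum, breaking when it drops ≤ 0;
-- returns (isSuccess, final momentum)
def survivorsInner (momentum : Int) (powerups : List Int) : Bool × Int :=
  match powerups with
  | [] => (true, momentum)
  | e :: rest =>
    let m := momentum + (e - 1)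
    if m ≤ 0 then (false, m) else survivorsInner m rest

-- main loop of A over zip, carrying output and the index counter i
def survivorsGo (zs : List (Int × List Int)) (output : List Int) (i : Int) : List Int :=
  match zs with
  | [] => output
  | (momentum, powerups) :: rest =>
    if momentum ≤ 0 then survivorsGo rest output (i + 1)
    else
      let r := survivorsInner momentum powerups
      if r.1 || decide (0 < r.2) then survivorsGo rest (output ++ [i]) (i + 1)
      else survivorsGo rest output (i + 1)

def survivors (list_of_momentum : List Int) (list_of_powerups : List (List Int)) : List Int :=
  survivorsGo (list_of_momentum.zip list_of_powerups) [] 0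

-- ===== PORT B =====
-- Source B's threshold: fold carrying (drain, worst); worst = max prefix drain
def pvThreshold (powerups : List Int) : Int :=
  (powerups.foldl
      (fun s e =>
        let d := s.1 + (1 - e)
        (d, if s.2 < d then d else s.2))
      (0, 0)).2

-- Source B: comprehension over enumerate(zip(...)) keeping i iff momentum > threshold(powerups)
def survivors_alt (list_of_momentum : List Int) (list_of_powerups : List (List Int)) : List Int :=
  ((PySem.List.enumerate (list_of_momentum.zip list_of_powerups)).filter
      (fun p => decide (pvThreshold p.2.2 < p.2.1))).map (fun p => p.1)

-- ===== PRECONDITION & SPEC =====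
def Spec_survivors (list_of_momentum : List Int) (list_of_powerups : List (List Int)) (out : List Int) : Prop := out = survivors_alt list_of_momentum list_of_powerups
instance (list_of_momentum : List Int) (list_of_powerups : List (List Int)) (out : List Int) : Decidable (Spec_survivors list_of_momentum list_of_powerups out) := by unfold Spec_survivors; infer_instance

-- ===== CLAIM (what is proved, stated in full; the proofs are below) =====
def Claim_equal_survivors : Prop := ∀ (list_of_momentum : List Int) (list_of_powerups : List (List Int)), Dom_survivors list_of_momentum list_of_powerups → Spec_survivors list_of_momentum list_of_powerups (survivors list_of_momentum list_of_powerups)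

-- ===== LEMMAS AND PROOFS =====
-- canonical recursive form of the maximum prefix drain
def fCanon : List Int → Int
  | [] => 0
  | e :: rest => max 0 ((1 - e) + fCanon rest)

theorem fCanon_nonneg (ps : List Int) : 0 ≤ fCanon ps := by
  cases ps with
  | nil => simp [fCanon]
  | cons e r => simp [fCanon]

-- the fold computing pvThreshold equals the canonical form
theorem thresholdFold_eq (ps : List Int) : ∀ (d w : Int), d ≤ w →
    (ps.foldl
        (fun s e =>
          let d := s.1 + (1 - e)
          (d, if s.2 < d then d else s.2))
        (d, w)).2 = max w (d + fCanon ps) := by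
  induction ps with
  | nil => intro d w h; simp [fCanon]; omega
  | cons e r ih =>
    intro d w h
    have hr := fCanon_nonneg r
    rw [List.foldl_cons]
    have : (max w (d + (1 - e))) = (if w < d + (1 - e) then d + (1 - e) else w) := by
      simp [max_def]; omega
    simp only [fCanon]
    rw [ih (d + (1 - e)) (if w < d + (1 - e) then d + (1 - e) else w) (by omega)]
    omega

theorem pvThreshold_eq (ps : List Int) : pvThreshold ps = fCanon ps := by
  have := thresholdFold_eq ps 0 0 le_rfl
  have hn := fCanon_nonneg ps
  unfold pvThreshold
  rw [this]; omega

-- with positive initial momentum, A's keep-condition is exactly fCanon ps < m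
theorem survivorsInner_eq_fCanon (ps : List Int) : ∀ (m : Int), 0 < m →
    ((survivorsInner m ps).1 || decide (0 < (survivorsInner m ps).2))
      = decide (fCanon ps < m) := by
  induction ps with
  | nil => intro m hm; simp [survivorsInner, fCanon]; omega
  | cons e rest ih =>
    intro m hm
    have hr := fCanon_nonneg rest
    rw [show survivorsInner m (e :: rest)
        = if m + (e - 1) ≤ 0 then (false, m + (e - 1)) else survivorsInner (m + (e - 1)) rest from rfl]
    by_cases h : m + (e - 1) ≤ 0
    · rw [if_pos h]
      have h2 : decide (fCanon (e :: rest) < m) = false := by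
        simp only [fCanon, decide_eq_false_iff_not, not_lt]
        omega
      rw [h2]
      simp
      omega
    · rw [if_neg h, ih (m + (e - 1)) (by omega)]
      simp only [decide_eq_decide, fCanon]
      omega

theorem survivorsGo_eq (zs : List (Int × List Int)) : ∀ (output : List Int) (i : Int),
    survivorsGo zs output i
      = output ++ ((PySem.List.enumerate zs i).filter
          (fun p => decide (pvThreshold p.2.2 < p.2.1))).map (fun p => p.1) := by
  induction zs with
  | nil => intro output i; simp [survivorsGo, PySem.List.enumerate_nil]
  | cons z rest ih =>
    intro output i
    obtain ⟨momentum, powerups⟩ := z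
    rw [PySem.List.enumerate_cons, List.filter_cons]
    by_cases h : momentum ≤ 0
    · have hc : (decide (pvThreshold powerups < momentum)) = false := by
        rw [pvThreshold_eq]
        have := fCanon_nonneg powerups
        simp; omega
      simp only [survivorsGo, h, if_true, hc, Bool.false_eq_true, if_false]
      exact ih output (i + 1)
    · have hm : 0 < momentum := by omega
      have hkey := survivorsInner_eq_fCanon powerups momentum hm
      rw [← pvThreshold_eq] at hkey
      simp only [survivorsGo, h, if_false, hkey]
      cases hk : (decide (pvThreshold powerups < momentum)) with
      | true =>
        simp only [if_true, List.map_cons]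
        rw [ih (output ++ [i]) (i + 1)]
        simp
      | false =>
        simp only [Bool.false_eq_true, if_false]
        exact ih output (i + 1)

-- ===== VERDICT (by name: the statement is the Claim_ definition above) =====
theorem survivors_spec : Claim_equal_survivors := by
  intro lm lp _
  unfold Spec_survivors survivors survivors_alt
  rw [survivorsGo_eq]
  simp
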